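-- pv_equiv track=rewrite | github.com/Makhotin0/Informatics_1sem | 2 семестр/4 неделя/Graph_beta_version.py | read_graph_as_neigh_list
-- ===== SOURCE A (Python) =====
-- def read_graph_as_neigh_list(edge_list):
--     graph_dict = {}  # dict()
--     vertex_set = set()
--     for edge in edge_list:
--         vertex_set.add(edge[0])
--         vertex_set.add(edge[1])
--     for v in vertex_set:
--         graph_dict[v] = frozenset()
--     for edge in edge_list:
--         graph_dict[edge[0]] = graph_dict[edge[0]] | frozenset([(edge[1], edge[2])])
--     return graph_dict
-- ===== SOURCE B (Python) =====
-- def read_graph_as_neigh_list(edge_list):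
--     vertices = {x for e in edge_list for x in (e[0], e[1])}
--     return {v: frozenset((e[1], e[2]) for e in edge_list if e[0] == v)
--             for v in vertices}
-- ===== Notes on version B (the rewrite author's own statement) =====
-- stated objective: simpler
-- what changed: Replaces A's three accumulation passes (vertex set, empty-dict init, per-edge frozenset union) with a flat vertex-set comprehension plus one dict comprehension that rescans the edge list per vertex.
import Mathlib
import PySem

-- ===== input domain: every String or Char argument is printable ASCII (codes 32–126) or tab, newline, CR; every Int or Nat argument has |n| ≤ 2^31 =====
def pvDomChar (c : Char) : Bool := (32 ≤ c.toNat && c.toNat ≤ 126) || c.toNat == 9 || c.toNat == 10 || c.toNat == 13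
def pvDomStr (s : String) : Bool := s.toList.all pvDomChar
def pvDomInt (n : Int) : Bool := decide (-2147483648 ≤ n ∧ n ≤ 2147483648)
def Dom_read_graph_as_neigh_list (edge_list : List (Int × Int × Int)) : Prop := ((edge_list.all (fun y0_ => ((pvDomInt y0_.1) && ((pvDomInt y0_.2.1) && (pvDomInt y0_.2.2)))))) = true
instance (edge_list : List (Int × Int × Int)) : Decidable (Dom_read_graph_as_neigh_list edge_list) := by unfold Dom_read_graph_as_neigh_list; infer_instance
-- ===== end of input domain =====

-- B replaces A's three accumulation passes by a vertex-set comprehension plus one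
-- per-vertex rescan of the edge list (simpler, not faster).

-- ===== PORT A =====
-- literal transliteration of A: vertex set, dict of empty frozensets, then per-edge union.
-- graph_dict[edge[0]] is always a present key (edge[0] ∈ vertex_set), so getD is exact there.
def read_graph_as_neigh_list (edge_list : List (Int × Int × Int)) : List (Int × List (Int × Int)) :=
  let vertex_set : PySem.Set Int :=
    edge_list.foldl (fun s e => PySem.Set.add (PySem.Set.add s e.1) e.2.1) PySem.Set.empty
  let graph_dict : PySem.Dict Int (PySem.Set (Int × Int)) :=
    vertex_set.foldl (fun d v => d.insert v PySem.Set.empty) PySem.Dict.empty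
  let graph_dict :=
    edge_list.foldl
      (fun d e =>
        d.insert e.1 (PySem.Set.union (d.getD e.1 PySem.Set.empty)
          (PySem.Set.ofList [(e.2.1, e.2.2)])))
      graph_dict
  graph_dict.items

-- ===== PORT B =====
def read_graph_as_neigh_list_alt (edge_list : List (Int × Int × Int)) : List (Int × List (Int × Int)) :=
  let vertices : PySem.Set Int := PySem.Set.ofList (edge_list.flatMap (fun e => [e.1, e.2.1]))
  vertices.map (fun v =>
    (v, PySem.Set.ofList
          (edge_list.filterMap (fun e => if e.1 == v then some (e.2.1, e.2.2) else none))))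

-- ===== PRECONDITION & SPEC =====
def Spec_read_graph_as_neigh_list (edge_list : List (Int × Int × Int)) (out : List (Int × List (Int × Int))) : Prop := out = read_graph_as_neigh_list_alt edge_list
instance (edge_list : List (Int × Int × Int)) (out : List (Int × List (Int × Int))) : Decidable (Spec_read_graph_as_neigh_list edge_list out) := by unfold Spec_read_graph_as_neigh_list; infer_instance

-- ===== CLAIM (what is proved, stated in full; the proofs are below) =====
def Claim_equal_read_graph_as_neigh_list : Prop := ∀ (edge_list : List (Int × Int × Int)), Dom_read_graph_as_neigh_list edge_list → Spec_read_graph_as_neigh_list edge_list (read_graph_as_neigh_list edge_list)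

-- ===== LEMMAS AND PROOFS =====

-- A's two adds per edge = B's fold over the flattened endpoint list.
theorem pv_verts_eq (edge_list : List (Int × Int × Int)) :
    edge_list.foldl (fun s e => PySem.Set.add (PySem.Set.add s e.1) e.2.1) PySem.Set.empty
      = PySem.Set.ofList (edge_list.flatMap (fun e => [e.1, e.2.1])) := by
  rw [PySem.Set.ofList_eq_foldl]
  suffices h : ∀ (s : PySem.Set Int),
      edge_list.foldl (fun s e => PySem.Set.add (PySem.Set.add s e.1) e.2.1) s
        = (edge_list.flatMap (fun e => [e.1, e.2.1])).foldl PySem.Set.add s from (h _).symm ▸ rfl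
  intro s
  induction edge_list generalizing s with
  | nil => rfl
  | cons e l ih => simpa [List.flatMap_cons, List.foldl_append] using ih _

-- Set.update by elements already present is the identity.
theorem pv_update_of_subset (l : List Int) (s : PySem.Set Int) (h : ∀ x ∈ l, x ∈ s) :
    PySem.Set.update s l = s := by
  induction l generalizing s with
  | nil => rfl
  | cons x l ih =>
      rw [PySem.Set.update_cons, PySem.Set.add_of_mem (h x (by simp))]
      exact ih s (fun y hy => h y (by simp [hy]))

-- the initialisation loop leaves every lookup (with default ∅) at ∅.
theorem pv_getD_init (verts : List Int) (v : Int) :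
    ((verts.foldl (fun d v => d.insert v PySem.Set.empty)
        (PySem.Dict.empty : PySem.Dict Int (PySem.Set (Int × Int)))).getD v PySem.Set.empty)
      = PySem.Set.empty := by
  suffices h : ∀ d : PySem.Dict Int (PySem.Set (Int × Int)),
      d.getD v PySem.Set.empty = PySem.Set.empty →
      (verts.foldl (fun d v => d.insert v PySem.Set.empty) d).getD v PySem.Set.empty
        = PySem.Set.empty from
    h _ (PySem.Dict.getD_empty _ _)
  intro d hd
  induction verts generalizing d with
  | nil => exact hd
  | cons w l ih =>
      refine ih _ ?_
      rw [PySem.Dict.getD_insert]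
      split
      · rfl
      · exact hd

-- loop invariant of A's third pass: the accumulated neighbour set at v is the
-- fold of Set.add over the pairs of edges leaving v, on top of the start value.
theorem pv_inv (l : List (Int × Int × Int)) (d : PySem.Dict Int (PySem.Set (Int × Int))) (v : Int) :
    ((l.foldl
        (fun d e =>
          d.insert e.1 (PySem.Set.union (d.getD e.1 PySem.Set.empty)
            (PySem.Set.ofList [(e.2.1, e.2.2)])))
        d).getD v PySem.Set.empty)
      = (l.filterMap (fun e => if e.1 == v then some (e.2.1, e.2.2) else none)).foldl
          PySem.Set.add (d.getD v PySem.Set.empty) := by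
  induction l generalizing d with
  | nil => rfl
  | cons e l ih =>
      simp only [List.foldl_cons, List.filterMap_cons]
      by_cases hev : e.1 = v
      · subst hev
        simp only [BEq.rfl, ih]
        rw [PySem.Dict.getD_insert_self]
        rfl
      · have hb : (e.1 == v) = false := by simpa using hev
        simp only [hb, Bool.false_eq_true, if_false, ih]
        rw [PySem.Dict.getD_insert, if_neg (Ne.symm hev)]

-- ===== VERDICT (by name: the statement is the Claim_ definition above) =====
theorem read_graph_as_neigh_list_spec : Claim_equal_read_graph_as_neigh_list := by
  intro edge_list _
  unfold Spec_read_graph_as_neigh_list read_graph_as_neigh_list read_graph_as_neigh_list_alt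
  rw [pv_verts_eq]
  set verts : PySem.Set Int := PySem.Set.ofList (edge_list.flatMap (fun e => [e.1, e.2.1])) with hverts
  set d0 : PySem.Dict Int (PySem.Set (Int × Int)) :=
    verts.foldl (fun d v => d.insert v PySem.Set.empty) PySem.Dict.empty with hd0
  set d1 : PySem.Dict Int (PySem.Set (Int × Int)) :=
    edge_list.foldl
      (fun d e =>
        d.insert e.1 (PySem.Set.union (d.getD e.1 PySem.Set.empty)
          (PySem.Set.ofList [(e.2.1, e.2.2)])))
      d0 with hd1
  have hk0 : d0.keys = verts := by
    rw [hd0, PySem.Dict.keys_foldl_insert]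
    rw [PySem.Dict.keys_empty, PySem.Set.update_nil_left]
    exact PySem.Set.ofList_eq_self_of_nodup _ (PySem.Set.nodup_ofList _)
  have hk1 : d1.keys = verts := by
    rw [hd1,
      PySem.Dict.keys_foldl_insert_key edge_list (fun e => e.1)
        (fun d e => PySem.Set.union (d.getD e.1 PySem.Set.empty)
          (PySem.Set.ofList [(e.2.1, e.2.2)])) d0,
      hk0]
    refine pv_update_of_subset _ _ ?_
    intro x hx
    rw [hverts, PySem.Set.mem_ofList]
    simp only [List.mem_map] at hx
    obtain ⟨e, he, rfl⟩ := hx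
    exact List.mem_flatMap.2 ⟨e, he, by simp⟩
  have hval : ∀ v : Int, d1.getD v PySem.Set.empty
      = PySem.Set.ofList
          (edge_list.filterMap (fun e => if e.1 == v then some (e.2.1, e.2.2) else none)) := by
    intro v
    rw [hd1, pv_inv, hd0, pv_getD_init, PySem.Set.ofList_eq_foldl]; rfl
  rw [PySem.Dict.items_eq_map_keys d1 (hk1 ▸ PySem.Set.nodup_ofList _) PySem.Set.empty, hk1]
  exact List.map_congr_left (fun v _ => by rw [hval v])
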